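-- pv_equiv track=rewrite | github.com/eudo06/pychatbox-Eudes-Rawad | main.py | associer_prenom
-- ===== SOURCE A (Python) =====
-- def associer_prenom(liste_nom) :
--
--     Chirac = {}
--     Mitterand = {}
--     Hollande = {}
--     Macron = {}
--     Sarkozy = {}
--     Giscard = {}
--
--     for nom in liste_nom:
--         if nom == "Chirac" :
--             Chirac = {'Chirac':'Jacques'}
--         elif nom == "Mitterrand" :
--             Mitterand = {"Mitterand":"François"}
--         elif nom == "Hollande" :
--             Hollande = {"Hollande":"François"}
--         elif nom == "Macron" :
--             Macron = {"Macron":"Emmanuel"}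
--         elif nom == "Sarkozy" :
--             Sarkozy = {"Sarkozy":"Nicolas"}
--         elif nom == "Giscard dEstaing" :
--             Giscard = {"Giscard dEstaing":"Valéry"}
--
--     president_complet = {**Chirac, **Mitterand,**Hollande, **Macron, **Sarkozy, **Giscard }
--     return president_complet
-- ===== SOURCE B (Python) =====
-- def associer_prenom(liste_nom):
--     table = [
--         ("Chirac", ("Chirac", "Jacques")),
--         ("Mitterrand", ("Mitterand", "François")),
--         ("Hollande", ("Hollande", "François")),
--         ("Macron", ("Macron", "Emmanuel")),
--         ("Sarkozy", ("Sarkozy", "Nicolas")),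
--         ("Giscard dEstaing", ("Giscard dEstaing", "Valéry")),
--     ]
--     president_complet = {}
--     for name, (cle, prenom) in table:
--         if name in liste_nom:
--             president_complet[cle] = prenom
--     return president_complet
-- ===== Notes on version B (the rewrite author's own statement) =====
-- stated objective: idiomatic
-- what changed: Instead of per-element branching over the input that rebinds six separate one-entry dicts and merges them at the end, B loops over a fixed ordered table of presidents and adds an entry when the surname occurs in the input list.
import Mathlib
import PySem

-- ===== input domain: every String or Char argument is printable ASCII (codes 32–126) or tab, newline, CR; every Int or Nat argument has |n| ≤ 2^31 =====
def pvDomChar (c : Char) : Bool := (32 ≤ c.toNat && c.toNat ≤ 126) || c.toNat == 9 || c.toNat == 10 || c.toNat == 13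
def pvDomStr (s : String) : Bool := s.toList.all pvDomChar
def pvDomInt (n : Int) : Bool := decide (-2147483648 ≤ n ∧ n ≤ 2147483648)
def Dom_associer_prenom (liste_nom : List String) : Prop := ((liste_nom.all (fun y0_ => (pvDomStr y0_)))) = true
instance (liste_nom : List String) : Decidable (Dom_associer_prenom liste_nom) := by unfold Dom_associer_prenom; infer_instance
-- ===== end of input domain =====

-- B replaces A's per-element branching over six rebindable one-entry dicts by a loop over a fixed ordered president table with a membership test (idiomatic).


-- ===== PORT A =====
-- state: the six dict variables (Chirac, Mitterand, Hollande, Macron, Sarkozy, Giscard), each a dict as assoc list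
def associerLoopA (l : List String)
    (st : List (String × String) × List (String × String) × List (String × String) ×
          List (String × String) × List (String × String) × List (String × String)) :
    List (String × String) × List (String × String) × List (String × String) ×
    List (String × String) × List (String × String) × List (String × String) :=
  l.foldl (fun st nom =>
    let (c, m, h, ma, s, g) := st
    if nom = "Chirac" then ([("Chirac", "Jacques")], m, h, ma, s, g)
    else if nom = "Mitterrand" then (c, [("Mitterand", "François")], h, ma, s, g)
    else if nom = "Hollande" then (c, m, [("Hollande", "François")], ma, s, g)
    else if nom = "Macron" then (c, m, h, [("Macron", "Emmanuel")], s, g)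
    else if nom = "Sarkozy" then (c, m, h, ma, [("Sarkozy", "Nicolas")], g)
    else if nom = "Giscard dEstaing" then (c, m, h, ma, s, [("Giscard dEstaing", "Valéry")])
    else (c, m, h, ma, s, g)) st

def associer_prenom (liste_nom : List String) : List (String × String) :=
  let st := associerLoopA liste_nom ([], [], [], [], [], [])
  let (c, m, h, ma, s, g) := st
  -- {**Chirac, **Mitterand, **Hollande, **Macron, **Sarkozy, **Giscard}: the six dicts have
  -- pairwise distinct keys (each is empty or a distinct one-key literal), so the merge is
  -- exactly concatenation in this order
  c ++ m ++ h ++ ma ++ s ++ g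

-- ===== PORT B =====
def presidentTable : List (String × String × String) :=
  [("Chirac", "Chirac", "Jacques"),
   ("Mitterrand", "Mitterand", "François"),
   ("Hollande", "Hollande", "François"),
   ("Macron", "Macron", "Emmanuel"),
   ("Sarkozy", "Sarkozy", "Nicolas"),
   ("Giscard dEstaing", "Giscard dEstaing", "Valéry")]

def associer_prenom_alt (liste_nom : List String) : List (String × String) :=
  -- keys added are pairwise distinct, so each dict assignment appends a fresh entry
  presidentTable.foldl (fun acc t =>
    if liste_nom.contains t.1 then acc ++ [(t.2.1, t.2.2)] else acc) []

-- ===== PRECONDITION & SPEC =====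
def Spec_associer_prenom (liste_nom : List String) (out : List (String × String)) : Prop := out = associer_prenom_alt liste_nom
instance (liste_nom : List String) (out : List (String × String)) : Decidable (Spec_associer_prenom liste_nom out) := by unfold Spec_associer_prenom; infer_instance

-- ===== CLAIM (what is proved, stated in full; the proofs are below) =====
def Claim_equal_associer_prenom : Prop := ∀ (liste_nom : List String), Dom_associer_prenom liste_nom → Spec_associer_prenom liste_nom (associer_prenom liste_nom)

-- ===== LEMMAS AND PROOFS =====
def flag (l : List String) (name : String) (pair : String × String) (init : List (String × String)) :
    List (String × String) :=
  if l.contains name then [pair] else init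

theorem associerLoopA_eq (l : List String) (c m h ma s g : List (String × String)) :
    associerLoopA l (c, m, h, ma, s, g) =
      (flag l "Chirac" ("Chirac", "Jacques") c,
       flag l "Mitterrand" ("Mitterand", "François") m,
       flag l "Hollande" ("Hollande", "François") h,
       flag l "Macron" ("Macron", "Emmanuel") ma,
       flag l "Sarkozy" ("Sarkozy", "Nicolas") s,
       flag l "Giscard dEstaing" ("Giscard dEstaing", "Valéry") g) := by
  induction l generalizing c m h ma s g with
  | nil => simp [associerLoopA, flag]
  | cons x xs ih =>
    simp only [associerLoopA, List.foldl_cons] at *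
    split_ifs with h1 h2 h3 h4 h5 h6 <;>
      simp [flag, eq_comm (b := x), *]

theorem associer_prenom_spec : Claim_equal_associer_prenom := by
  intro l _
  unfold Spec_associer_prenom associer_prenom associer_prenom_alt presidentTable
  rw [associerLoopA_eq]
  simp only [flag, List.foldl_cons, List.foldl_nil]
  split_ifs <;> simp_all
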